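-- pv_equiv track=rewrite | github.com/JHAMILCALI/MATERIAL_INFORMATICA | PRIMER SEMESTRE/INF-111 PROGRAMACION 1/LABORATORIO/LABORATORIO 10/Ejercio 2.py | contarpalmqj
-- ===== SOURCE A (Python) =====
-- def contarpalmqj(bmqj):
--     bmqj=bmqj+" "
--     cmqj=0
--     elemqj = len(bmqj)
--     for imqj in range(1,elemqj+1):
--         ymqj = bmqj[imqj-1:imqj]
--         if ymqj==" ":
--             cmqj=cmqj+1
--     return cmqj
-- ===== SOURCE B (Python) =====
-- def contarpalmqj(bmqj):
--     # Different decomposition: instead of scanning characters and incrementing a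
--     # counter, split the string into its space-separated pieces and return how
--     # many pieces there are.  Splitting on a single space yields exactly
--     # (number of spaces) + 1 parts, which equals A's count of spaces in
--     # bmqj + " " (the appended trailing space contributes the +1).
--     return len(bmqj.split(" "))
-- ===== Notes on version B (the rewrite author's own statement) =====
-- stated objective: idiomatic
-- what changed: B splits the string on a single space and returns the number of resulting pieces (pieces = spaces + 1), instead of A's index loop that slices out a one-character substring per position, compares it to a space and increments a counter after appending a trailing space; the single C-level split removes the per-character Python-level slicing, a constant-factor win.
import Mathlib
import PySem

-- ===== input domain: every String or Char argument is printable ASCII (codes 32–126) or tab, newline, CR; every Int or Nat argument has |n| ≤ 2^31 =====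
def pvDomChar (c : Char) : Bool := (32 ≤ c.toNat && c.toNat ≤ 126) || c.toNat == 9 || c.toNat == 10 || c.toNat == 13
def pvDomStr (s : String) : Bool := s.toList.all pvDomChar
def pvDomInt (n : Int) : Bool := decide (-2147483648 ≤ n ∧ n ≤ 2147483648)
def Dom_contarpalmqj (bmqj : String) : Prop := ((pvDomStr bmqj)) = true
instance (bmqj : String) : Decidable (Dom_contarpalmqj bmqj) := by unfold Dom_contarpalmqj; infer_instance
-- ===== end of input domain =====

-- B splits the string on a single space and returns the number of pieces (pieces = spaces + 1),
-- instead of A's per-character slice-and-compare counting loop.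

-- ===== PORT A =====
def contarpalmqj (bmqj : String) : Int :=
  let s : List Char := bmqj.toList ++ [' ']      -- bmqj = bmqj + " "
  let elemqj : Int := s.length
  (PySem.List.pyRange 1 (elemqj + 1) 1).foldl
    (fun cmqj imqj =>
      let ymqj := PySem.List.slice s (some (imqj - 1)) (some imqj)
      if ymqj == [' '] then cmqj + 1 else cmqj) 0

-- ===== PORT B =====
-- bmqj.split(" ") with a nonempty separator is PySem.Chars.splitOn; B returns len of that list.
def contarpalmqj_alt (bmqj : String) : Int :=
  ((PySem.Chars.splitOn bmqj.toList [' ']).length : Int)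

-- ===== PRECONDITION & SPEC =====
def Spec_contarpalmqj (bmqj : String) (out : Int) : Prop := out = contarpalmqj_alt bmqj
instance (bmqj : String) (out : Int) : Decidable (Spec_contarpalmqj bmqj out) := by unfold Spec_contarpalmqj; infer_instance

-- ===== CLAIM (what is proved, stated in full; the proofs are below) =====
def Claim_equal_contarpalmqj : Prop := ∀ (bmqj : String), Dom_contarpalmqj bmqj → Spec_contarpalmqj bmqj (contarpalmqj bmqj)

-- ===== LEMMAS AND PROOFS =====

-- splitting on a single space yields (count of ' ') + 1 pieces
theorem pv_splitOnGo_space (l : List Char) : ∀ (fuel : Nat) (cur : List Char) (acc : List (List Char)),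
    l.length < fuel →
    (PySem.Chars.splitOn.go [' '] fuel l cur acc).length = acc.length + 1 + l.count ' ' := by
  induction l with
  | nil =>
      intro fuel cur acc hfuel
      cases fuel with
      | zero => omega
      | succ f => simp [PySem.Chars.splitOn.go]
  | cons c t ih =>
      intro fuel cur acc hfuel
      cases fuel with
      | zero => simp at hfuel
      | succ f =>
          simp only [List.length_cons, Nat.succ_lt_succ_iff] at hfuel
          by_cases hc : c = ' '
          · subst hc
            have hpre : List.isPrefixOf [' '] (' ' :: t) = true := by
              simp [List.isPrefixOf]
            simp only [PySem.Chars.splitOn.go, hpre, if_true, List.length_cons,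
              List.drop_succ_cons]
            simp only [List.length_nil, List.drop_zero]
            rw [ih f [] (cur.reverse :: acc) hfuel]
            simp [List.count_cons]
            omega
          · have hpre : List.isPrefixOf [' '] (c :: t) = false := by
              simp [List.isPrefixOf]
              exact fun h => hc h.symm
            simp only [PySem.Chars.splitOn.go, hpre, Bool.false_eq_true, if_false]
            rw [ih f (c :: cur) acc hfuel]
            simp [hc]

theorem pv_splitOn_space (s : List Char) :
    (PySem.Chars.splitOn s [' ']).length = s.count ' ' + 1 := by
  unfold PySem.Chars.splitOn
  rw [pv_splitOnGo_space s (s.length + 1) [] [] (by omega)]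
  simp [Nat.add_comm]

-- A's loop over range(1, n+1) counts the spaces among the first n characters
theorem pv_loopA (s : List Char) : ∀ (n : Nat), n ≤ s.length →
    (List.countP (fun i => PySem.List.slice s (some (i - 1)) (some i) == [' '])
      (PySem.List.pyRange 1 ((n : Int) + 1) 1)) = (s.take n).count ' ' := by
  intro n
  induction n with
  | zero =>
      intro _
      rw [show ((((0:Nat)) : Int) + 1) = (1:Int) from by norm_num,
        show PySem.List.pyRange 1 (1:Int) 1 = [] from by decide]
      simp
  | succ n ih =>
      intro hn
      have hle : (1 : Int) ≤ (n : Int) + 1 := by omega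
      have hrange := PySem.List.pyRange_one_succ_right (a := 1) (b := (n : Int) + 1) hle
      have hcast : ((n + 1 : Nat) : Int) + 1 = ((n : Int) + 1) + 1 := by push_cast; ring
      have hslice : PySem.List.slice s (some ((n : Int) + 1 - 1)) (some ((n : Int) + 1))
          = List.take 1 (List.drop n s) := by
        have h1 : ((n : Int) + 1 - 1) = (n : Int) := by ring
        have h2 : ((n : Int) + 1) = (n : Int) + ((1 : Nat) : Int) := by push_cast; ring
        rw [h1, h2, PySem.List.slice_natCast_add]
      have hn' : n < s.length := by omega
      have htake : List.take 1 (List.drop n s) = [s[n]] := by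
        rw [List.take_one, List.head?_drop]
        simp [List.getElem?_eq_getElem hn']
      have htk : s.take (n + 1) = s.take n ++ [s[n]] := List.take_succ_eq_append_getElem hn'
      rw [hcast, hrange, List.countP_append, ih (by omega), htk]
      simp only [List.countP_cons, List.countP_nil, List.count_append, List.count_cons,
        List.count_nil, hslice, htake]
      by_cases hc : s[n] = ' ' <;> simp [hc]

theorem pv_A_eq (bmqj : String) :
    contarpalmqj bmqj = ((bmqj.toList ++ [' ']).count ' ' : Int) := by
  unfold contarpalmqj
  simp only []
  rw [PySem.List.foldl_count_if
    (fun i => PySem.List.slice (bmqj.toList ++ [' ']) (some (i - 1)) (some i) == [' '])]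
  have h := pv_loopA (bmqj.toList ++ [' ']) (bmqj.toList ++ [' ']).length le_rfl
  simp only [List.take_length] at h
  rw [show ((bmqj.toList ++ [' ']).length : Int) = (((bmqj.toList ++ [' ']).length : Nat) : Int) from rfl,
    h]
  simp

-- ===== VERDICT (by name: the statement is the Claim_ definition above) =====
theorem contarpalmqj_spec : Claim_equal_contarpalmqj := by
  intro bmqj _
  unfold Spec_contarpalmqj contarpalmqj_alt
  rw [pv_A_eq, pv_splitOn_space]
  simp [List.count_append]
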